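-- pv_equiv track=rewrite | github.com/cmbi/gold_standard | gold_standard_src/convert_final_core_var_to_json.py | convert_pairwise_aln_to_json
-- ===== SOURCE A (Python) =====
-- def convert_pairwise_aln_to_json(target_cores, core_aln_strct2, var_regions_strct2):
--     """
--     converts a pairwise alignment to json
--     :param target_cores: grounded target core sequence
--     :param core_aln_strct2: grounded sequence of the 2nd structure
--     :param var_regions_strct2: list of residues in the variable regions (2nd structure)
--     :return: json alignment
--     """
--     all_strct2_residues = filter(lambda x: x != '-', sorted(core_aln_strct2 + var_regions_strct2))
--
--     pairwise_json_aln = {}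
--     for res_num in all_strct2_residues:
--         if res_num == '-':
--             continue
--         if res_num in core_aln_strct2:
--             index = core_aln_strct2.index(res_num)
--             pairwise_json_aln[res_num] = {target_cores[index]: 'a'}
--         else:
--             pairwise_json_aln[res_num] = {'*': 'u'}
--     return pairwise_json_aln
-- ===== SOURCE B (Python) =====
-- def convert_pairwise_aln_to_json(target_cores, core_aln_strct2, var_regions_strct2):
--     """Two direct passes build each entry exactly once (no sort of the duplicate-laden
--     list, no membership/.index scans); the distinct items are sorted once at the end."""
--     result = {}
--     for i, res in enumerate(core_aln_strct2):
--         if res != '-' and res not in result: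
--             result[res] = {target_cores[i]: 'a'}
--     for res in var_regions_strct2:
--         if res != '-' and res not in result:
--             result[res] = {'*': 'u'}
--     return dict(sorted(result.items(), key=lambda kv: kv[0]))
-- ===== Notes on version B (the rewrite author's own statement) =====
-- stated objective: faster
-- what changed: Instead of sorting the duplicate-carrying concatenation and doing a per-residue membership test plus list.index scan, B builds each entry exactly once in two direct passes (enumerate over the core sequence, then the variable regions) and sorts only the distinct result items once at the end.
import Mathlib
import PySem

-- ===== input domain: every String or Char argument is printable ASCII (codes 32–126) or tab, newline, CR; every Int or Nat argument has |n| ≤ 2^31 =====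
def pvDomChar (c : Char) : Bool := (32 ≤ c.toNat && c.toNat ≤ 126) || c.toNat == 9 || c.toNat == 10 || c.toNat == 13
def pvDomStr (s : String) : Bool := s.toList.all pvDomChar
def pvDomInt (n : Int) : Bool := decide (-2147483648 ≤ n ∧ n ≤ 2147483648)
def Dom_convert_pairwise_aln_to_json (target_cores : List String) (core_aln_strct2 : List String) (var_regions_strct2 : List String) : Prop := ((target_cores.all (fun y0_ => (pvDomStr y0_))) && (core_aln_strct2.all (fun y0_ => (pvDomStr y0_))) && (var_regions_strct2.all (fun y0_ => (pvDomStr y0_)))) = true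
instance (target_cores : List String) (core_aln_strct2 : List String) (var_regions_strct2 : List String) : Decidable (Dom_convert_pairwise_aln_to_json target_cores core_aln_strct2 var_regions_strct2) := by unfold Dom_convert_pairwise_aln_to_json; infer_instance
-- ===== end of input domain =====

-- B builds each entry once in two direct passes (core pass, then variable-region pass)
-- and sorts only the distinct items once at the end (objective: faster, asymptotically).

-- ===== PORT A =====
def convert_pairwise_aln_to_json (target_cores : List String) (core_aln_strct2 : List String) (var_regions_strct2 : List String) : List (String × List (String × String)) :=
  let all_strct2_residues :=
    (PySem.List.sorted (core_aln_strct2 ++ var_regions_strct2) (fun x => x)).filter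
      (fun x => x != "-")
  (all_strct2_residues.foldl (fun d res_num =>
      if res_num = "-" then d
      else if res_num ∈ core_aln_strct2 then
        -- index = core_aln_strct2.index(res_num); target_cores[index] (IndexError → total via getD, excluded by Pre_)
        d.insert res_num
          [((PySem.List.pyGet? target_cores
              (((PySem.List.index? core_aln_strct2 res_num).getD 0 : Nat) : Int)).getD "", "a")]
      else d.insert res_num [("*", "u")])
    PySem.Dict.empty).items

-- ===== PORT B =====
def convert_pairwise_aln_to_json_alt (target_cores : List String) (core_aln_strct2 : List String) (var_regions_strct2 : List String) : List (String × List (String × String)) :=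
  -- first pass: for i, res in enumerate(core): if res != '-' and res not in result: result[res] = {target_cores[i]: 'a'}
  -- (target_cores[i] raises IndexError in Python; total here via getD, excluded by Pre_)
  let d1 := (PySem.List.enumerate core_aln_strct2).foldl
      (fun d p => if p.2 != "-" && !(d.contains p.2)
                  then d.insert p.2 [((PySem.List.pyGet? target_cores p.1).getD "", "a")]
                  else d)
      PySem.Dict.empty
  -- second pass: for res in var: if res != '-' and res not in result: result[res] = {'*': 'u'}
  let d2 := var_regions_strct2.foldl
      (fun d r => if r != "-" && !(d.contains r) then d.insert r [("*", "u")] else d) d1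
  -- return dict(sorted(result.items(), key=lambda kv: kv[0]))
  PySem.List.sorted d2.items (fun kv => kv.1)

-- ===== PRECONDITION & SPEC =====
-- Pre_ excludes exactly the inputs where Python A raises IndexError: a non-'-' residue of
-- core_aln_strct2 whose first-occurrence index is ≥ len(target_cores).
def Pre_convert_pairwise_aln_to_json (target_cores : List String) (core_aln_strct2 : List String) (var_regions_strct2 : List String) : Prop :=
  ∀ res ∈ core_aln_strct2, res ≠ "-" → core_aln_strct2.idxOf res < target_cores.length
instance (target_cores : List String) (core_aln_strct2 : List String) (var_regions_strct2 : List String) : Decidable (Pre_convert_pairwise_aln_to_json target_cores core_aln_strct2 var_regions_strct2) := by unfold Pre_convert_pairwise_aln_to_json; infer_instance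
def pvWitness_convert_pairwise_aln_to_json : List String × List String × List String :=
  (["7"], ["7", "-"], ["3"])
def Spec_convert_pairwise_aln_to_json (target_cores : List String) (core_aln_strct2 : List String) (var_regions_strct2 : List String) (out : List (String × List (String × String))) : Prop := out = convert_pairwise_aln_to_json_alt target_cores core_aln_strct2 var_regions_strct2
instance (target_cores : List String) (core_aln_strct2 : List String) (var_regions_strct2 : List String) (out : List (String × List (String × String))) : Decidable (Spec_convert_pairwise_aln_to_json target_cores core_aln_strct2 var_regions_strct2 out) := by unfold Spec_convert_pairwise_aln_to_json; infer_instance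

-- ===== CLAIM =====
def Claim_equal_convert_pairwise_aln_to_json : Prop := ∀ (target_cores : List String) (core_aln_strct2 : List String) (var_regions_strct2 : List String), Dom_convert_pairwise_aln_to_json target_cores core_aln_strct2 var_regions_strct2 → Pre_convert_pairwise_aln_to_json target_cores core_aln_strct2 var_regions_strct2 → Spec_convert_pairwise_aln_to_json target_cores core_aln_strct2 var_regions_strct2 (convert_pairwise_aln_to_json target_cores core_aln_strct2 var_regions_strct2)

-- ===== LEMMAS AND PROOFS =====

-- the per-key value both programs end up storing
def pvValA (target_cores : List String) (core_aln_strct2 : List String) (res : String) : List (String × String) :=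
  if res ∈ core_aln_strct2 then
    [((PySem.List.pyGet? target_cores
        (((PySem.List.index? core_aln_strct2 res).getD 0 : Nat) : Int)).getD "", "a")]
  else [("*", "u")]

lemma getD_foldl_insertV {κ ν : Type} [BEq κ] [LawfulBEq κ] [DecidableEq κ]
    (V : κ → ν) (l : List κ) (d : PySem.Dict κ ν) (k : κ) (dflt : ν) :
    (l.foldl (fun d x => d.insert x (V x)) d).getD k dflt
      = if k ∈ l then V k else d.getD k dflt := by
  induction l generalizing d with
  | nil => simp
  | cons x xs ih =>
    simp only [List.foldl_cons, ih, PySem.Dict.getD_insert, List.mem_cons]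
    by_cases hx : k ∈ xs <;> by_cases he : k = x <;> simp [hx, he]

lemma items_foldl_insertV {κ ν : Type} [BEq κ] [LawfulBEq κ] [DecidableEq κ]
    (V : κ → ν) (l : List κ) (dflt : ν) :
    (l.foldl (fun d x => d.insert x (V x)) PySem.Dict.empty).items
      = (PySem.Set.ofList l).map (fun k => (k, V k)) := by
  have hnd := PySem.Dict.nodup_keys_foldl_insert l (fun _ x => V x) (PySem.Dict.empty (κ := κ) (ν := ν)) (by simp)
  have hkeys := PySem.Dict.keys_foldl_insert l (fun _ x => V x) (PySem.Dict.empty (κ := κ) (ν := ν))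
  rw [PySem.Dict.items_eq_map_keys _ hnd dflt]
  have hupd : PySem.Set.update (PySem.Dict.empty (κ := κ) (ν := ν)).keys l = PySem.Set.ofList l := by
    simp [PySem.Set.update, PySem.Set.ofList_eq_foldl]
  rw [hkeys, hupd]
  apply List.map_congr_left
  intro k hk
  rw [getD_foldl_insertV]
  simp [(PySem.Set.mem_ofList l k).mp hk]

lemma foldl_add_sublist {α : Type} [BEq α] [LawfulBEq α] (xs : List α) (s : List α) :
    (xs.foldl PySem.Set.add s).Sublist (s ++ xs) := by
  induction xs generalizing s with
  | nil => simp
  | cons x xs ih =>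
    have h1 := ih (PySem.Set.add s x)
    have h2 : (PySem.Set.add s x ++ xs).Sublist (s ++ x :: xs) := by
      by_cases hc : x ∈ s
      · simpa [PySem.Set.add, hc] using (List.sublist_cons_self x xs).append_left s
      · have he : PySem.Set.add s x ++ xs = s ++ x :: xs := by
          simp [PySem.Set.add, hc]
        rw [he]
    exact h1.trans h2

lemma ofList_sublist {α : Type} [BEq α] [LawfulBEq α] (xs : List α) :
    (PySem.Set.ofList xs).Sublist xs := by
  simpa using foldl_add_sublist xs []

lemma idxOf?_eq_some_of_mem {α : Type} [BEq α] [LawfulBEq α] (l : List α) (a : α) (h : a ∈ l) :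
    List.idxOf? a l = some (l.idxOf a) := by
  induction l with
  | nil => cases h
  | cons x xs ih =>
    by_cases he : x = a
    · subst he; simp [List.idxOf?_cons]
    · rcases List.mem_cons.mp h with h1 | h1
      · exact absurd h1.symm he
      · simp [List.idxOf?_cons, List.idxOf_cons,
          (by simpa using he : (x == a) = false), ih h1]

lemma foldA_eq (tc core : List String) (l : List String) :
    ∀ (d : PySem.Dict String (List (String × String))), (∀ r ∈ l, r ≠ "-") →
    l.foldl (fun d res_num =>
      if res_num = "-" then d
      else if res_num ∈ core then
        d.insert res_num
          [((PySem.List.pyGet? tc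
              (((PySem.List.index? core res_num).getD 0 : Nat) : Int)).getD "", "a")]
      else d.insert res_num [("*", "u")]) d
    = l.foldl (fun d x => d.insert x (pvValA tc core x)) d := by
  induction l with
  | nil => intro d h; rfl
  | cons x xs ih =>
    intro d h
    have hx : ¬ (x = "-") := h x (by simp)
    by_cases hm : x ∈ core <;>
      simp only [List.foldl_cons, if_neg hx, hm, pvValA, if_true, if_false] <;>
      exact ih _ (fun r hr => h r (List.mem_cons_of_mem _ hr))

-- B's first pass: lookup after the fold over enumerate(core)
lemma pass1_get? (tc : List String) (core : List String) (k : String) (n : Int)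
    (d : PySem.Dict String (List (String × String))) :
    ((PySem.List.enumerate core n).foldl
        (fun d p => if p.2 != "-" && !(d.contains p.2)
                    then d.insert p.2 [((PySem.List.pyGet? tc p.1).getD "", "a")]
                    else d) d).get? k
      = if d.contains k then d.get? k
        else if k ≠ "-" ∧ k ∈ core then
          some [((PySem.List.pyGet? tc (n + (core.idxOf k : Nat))).getD "", "a")]
        else none := by
  induction core generalizing n d with
  | nil =>
    by_cases hdk : d.contains k <;>
      simp [PySem.List.enumerate, hdk, PySem.Dict.get?_eq_none_iff_contains]
  | cons x xs ih =>
    simp only [PySem.List.enumerate, List.foldl_cons]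
    by_cases hx : x = "-"
    · subst hx
      simp only [bne_self_eq_false, Bool.false_and, Bool.false_eq_true, if_false]
      rw [ih]
      by_cases hdk : d.contains k
      · simp [hdk]
      · by_cases he : k = "-"
        · simp [hdk, he]
        · have hbe : ("-" == k) = false := beq_eq_false_iff_ne.mpr (Ne.symm he)
          by_cases hm : k ∈ xs <;>
            simp [hdk, he, hm, List.idxOf_cons, hbe, Nat.cast_add, Nat.cast_one,
              Int.add_assoc, Int.add_comm, Int.add_left_comm]
    · by_cases hdx : d.contains x
      · rw [if_neg (by simp [hdx]), ih]
        by_cases hdk : d.contains k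
        · simp [hdk]
        · by_cases he : k = x
          · exact absurd hdx (he ▸ hdk)
          · have hbe : (x == k) = false := beq_eq_false_iff_ne.mpr (Ne.symm he)
            by_cases hm : k ∈ xs <;>
              simp [hdk, he, hm, List.idxOf_cons, hbe] <;> push_cast <;> ring
      · rw [if_pos (by simp [hx, hdx]), ih]
        by_cases he : k = x
        · subst he
          have hdk : d.contains k = false := by simpa using hdx
          simp [hdk, hx, List.idxOf_cons]
        · have hbe : (k == x) = false := beq_eq_false_iff_ne.mpr he
          have hbe' : (x == k) = false := beq_eq_false_iff_ne.mpr (Ne.symm he)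
          have hci : (d.insert x [((PySem.List.pyGet? tc n).getD "", "a")]).contains k
              = d.contains k := by
            simp [PySem.Dict.contains_insert, hbe]
          rw [hci]
          by_cases hdk : d.contains k
          · simp [hdk, PySem.Dict.get?_insert, he]
          · by_cases hm : k ∈ xs <;>
              simp [hdk, he, hm, List.idxOf_cons, hbe', PySem.Dict.get?_insert,
                Nat.cast_add, Nat.cast_one, Int.add_assoc, Int.add_comm, Int.add_left_comm]

-- B's first pass: keys after the fold
lemma pass1_keys (tc : List String) (core : List String) (n : Int)
    (d : PySem.Dict String (List (String × String))) :
    ((PySem.List.enumerate core n).foldl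
        (fun d p => if p.2 != "-" && !(d.contains p.2)
                    then d.insert p.2 [((PySem.List.pyGet? tc p.1).getD "", "a")]
                    else d) d).keys
      = (core.filter (fun r => r != "-")).foldl PySem.Set.add d.keys := by
  induction core generalizing n d with
  | nil => simp [PySem.List.enumerate]
  | cons x xs ih =>
    simp only [PySem.List.enumerate, List.foldl_cons, List.filter_cons]
    by_cases hx : x = "-"
    · subst hx
      simp only [bne_self_eq_false, Bool.false_and, Bool.false_eq_true, if_false]
      rw [ih]
    · have hbx : (x != "-") = true := by simp [hx]
      by_cases hdx : d.contains x
      · have hmem : x ∈ d.keys := (PySem.Dict.contains_iff_mem_keys d x).mp hdx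
        rw [if_neg (by simp [hdx]), hbx, ih]
        simp [PySem.Set.add, hmem]
      · have hmem : x ∉ d.keys := fun h => hdx ((PySem.Dict.contains_iff_mem_keys d x).mpr h)
        rw [if_pos (by simp [hx, hdx]), hbx, ih,
          PySem.Dict.keys_insert_of_not_contains _ _ (by simpa using hdx)]
        simp [PySem.Set.add, hmem]

-- B's second pass: lookup after the fold over var
lemma pass2_get? (var : List String) (k : String)
    (d : PySem.Dict String (List (String × String))) :
    (var.foldl (fun d r => if r != "-" && !(d.contains r)
                           then d.insert r [("*", "u")] else d) d).get? k
      = if d.contains k then d.get? k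
        else if k ≠ "-" ∧ k ∈ var then some [("*", "u")] else none := by
  induction var generalizing d with
  | nil =>
    by_cases hdk : d.contains k <;>
      simp [hdk, PySem.Dict.get?_eq_none_iff_contains]
  | cons x xs ih =>
    simp only [List.foldl_cons]
    by_cases hx : x = "-"
    · subst hx
      simp only [bne_self_eq_false, Bool.false_and, Bool.false_eq_true, if_false]
      rw [ih]
      by_cases hdk : d.contains k
      · simp [hdk]
      · by_cases he : k = "-" <;> by_cases hm : k ∈ xs <;> simp [hdk, he, hm]
    · by_cases hdx : d.contains x
      · rw [if_neg (by simp [hdx]), ih]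
        by_cases hdk : d.contains k
        · simp [hdk]
        · by_cases he : k = x
          · exact absurd hdx (he ▸ hdk)
          · by_cases hm : k ∈ xs <;> simp [hdk, he, hm]
      · rw [if_pos (by simp [hx, hdx]), ih]
        by_cases he : k = x
        · subst he
          have hdk : d.contains k = false := by simpa using hdx
          simp [hdk, hx, PySem.Dict.get?_insert]
        · have hbe : (k == x) = false := beq_eq_false_iff_ne.mpr he
          have hci : (d.insert x [("*", "u")]).contains k = d.contains k := by
            simp [PySem.Dict.contains_insert, hbe]
          rw [hci]
          by_cases hdk : d.contains k
          · simp [hdk, PySem.Dict.get?_insert, he]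
          · by_cases hm : k ∈ xs <;> simp [hdk, he, hm, PySem.Dict.get?_insert]

-- B's second pass: keys after the fold
lemma pass2_keys (var : List String)
    (d : PySem.Dict String (List (String × String))) :
    (var.foldl (fun d r => if r != "-" && !(d.contains r)
                           then d.insert r [("*", "u")] else d) d).keys
      = (var.filter (fun r => r != "-")).foldl PySem.Set.add d.keys := by
  induction var generalizing d with
  | nil => simp
  | cons x xs ih =>
    simp only [List.foldl_cons, List.filter_cons]
    by_cases hx : x = "-"
    · subst hx
      simp only [bne_self_eq_false, Bool.false_and, Bool.false_eq_true, if_false]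
      rw [ih]
    · have hbx : (x != "-") = true := by simp [hx]
      by_cases hdx : d.contains x
      · have hmem : x ∈ d.keys := (PySem.Dict.contains_iff_mem_keys d x).mp hdx
        rw [if_neg (by simp [hdx]), hbx, ih]
        simp [PySem.Set.add, hmem]
      · have hmem : x ∉ d.keys := fun h => hdx ((PySem.Dict.contains_iff_mem_keys d x).mpr h)
        rw [if_pos (by simp [hx, hdx]), hbx, ih,
          PySem.Dict.keys_insert_of_not_contains _ _ (by simpa using hdx)]
        simp [PySem.Set.add, hmem]

-- ===== VERDICT (by name: the statement is the Claim_ definition above) =====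
theorem convert_pairwise_aln_to_json_spec : Claim_equal_convert_pairwise_aln_to_json := by
  intro tc core var _hdom _hpre
  unfold Spec_convert_pairwise_aln_to_json
  have hres : ∀ r ∈ (PySem.List.sorted (core ++ var) (fun x => x)).filter (fun x => x != "-"),
      r ≠ "-" := by
    intro r hr
    simpa [bne] using (List.mem_filter.mp hr).2
  -- A's result: map over the sorted distinct keys
  have hA : convert_pairwise_aln_to_json tc core var
      = (PySem.Set.ofList
          ((PySem.List.sorted (core ++ var) (fun x => x)).filter (fun x => x != "-"))).map
          (fun k => (k, pvValA tc core k)) := by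
    show (((PySem.List.sorted (core ++ var) (fun x => x)).filter (fun x => x != "-")).foldl
        (fun d res_num =>
          if res_num = "-" then d
          else if res_num ∈ core then
            d.insert res_num
              [((PySem.List.pyGet? tc
                  (((PySem.List.index? core res_num).getD 0 : Nat) : Int)).getD "", "a")]
          else d.insert res_num [("*", "u")]) PySem.Dict.empty).items = _
    rw [foldA_eq tc core _ PySem.Dict.empty hres,
      items_foldl_insertV (pvValA tc core) _ [("*", "u")]]
  -- B's dict after the two passes
  set d1 := (PySem.List.enumerate core).foldl
      (fun d p => if p.2 != "-" && !(d.contains p.2)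
                  then d.insert p.2 [((PySem.List.pyGet? tc p.1).getD "", "a")]
                  else d)
      PySem.Dict.empty with hd1
  set d2 := var.foldl
      (fun d r => if r != "-" && !(d.contains r) then d.insert r [("*", "u")] else d) d1
    with hd2
  have hk1 : d1.keys = PySem.Set.ofList (core.filter (fun r => r != "-")) := by
    rw [hd1, pass1_keys]
    simp [PySem.Set.ofList_eq_foldl]
  have hk2 : d2.keys = PySem.Set.ofList ((core ++ var).filter (fun r => r != "-")) := by
    rw [hd2, pass2_keys, hk1, List.filter_append, PySem.Set.ofList_eq_foldl,
      PySem.Set.ofList_eq_foldl, List.foldl_append]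
  have hc1 : ∀ k : String, d1.contains k = true ↔ (k ≠ "-" ∧ k ∈ core) := by
    intro k
    rw [PySem.Dict.contains_iff_mem_keys, hk1]
    simp [PySem.Set.mem_ofList, List.mem_filter, and_comm]
  -- each key of d2 carries the value pvValA
  have hval : ∀ k ∈ d2.keys, d2.getD k [("*", "u")] = pvValA tc core k := by
    intro k hk
    rw [hk2] at hk
    have hk' := List.mem_filter.mp ((PySem.Set.mem_ofList _ _).mp hk)
    have hkne : k ≠ "-" := by simpa [bne] using hk'.2
    have hget2 := pass2_get? var k d1
    rw [← hd2] at hget2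
    by_cases hm : k ∈ core
    · have hcon : d1.contains k = true := (hc1 k).mpr ⟨hkne, hm⟩
      have hget1 := pass1_get? tc core k 0 PySem.Dict.empty
      rw [← hd1] at hget1
      have hidx := idxOf?_eq_some_of_mem core k hm
      rw [PySem.Dict.getD, hget2, if_pos hcon, hget1,
        if_neg (by simp), if_pos ⟨hkne, hm⟩]
      simp [pvValA, hm, PySem.List.index?_eq_idxOf?, hidx]
    · have hcon : d1.contains k = false := by
        rcases Bool.eq_false_or_eq_true (d1.contains k) with h | h
        · exact absurd ((hc1 k).mp h).2 hm
        · exact h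
      have hv : k ∈ var := by
        rcases List.mem_append.mp hk'.1 with h | h
        · exact absurd h hm
        · exact h
      rw [PySem.Dict.getD, hget2, hcon]
      simp [hkne, hv, pvValA, hm]
  -- items of d2 = map over its (nodup) keys
  have hnd2 : d2.keys.Nodup := by rw [hk2]; exact PySem.Set.nodup_ofList _
  have hitems : d2.items
      = (PySem.Set.ofList ((core ++ var).filter (fun r => r != "-"))).map
          (fun k => (k, pvValA tc core k)) := by
    rw [PySem.Dict.items_eq_map_keys d2 hnd2 [("*", "u")]]
    rw [show d2.keys.map (fun k => (k, d2.getD k [("*", "u")]))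
          = d2.keys.map (fun k => (k, pvValA tc core k)) from
        List.map_congr_left (fun k hk => by rw [hval k hk]), hk2]
  -- the two key lists are permutations; A's is strictly increasing
  have hperm : ((PySem.Set.ofList
        ((PySem.List.sorted (core ++ var) (fun x => x)).filter (fun x => x != "-")))).Perm
      (PySem.Set.ofList ((core ++ var).filter (fun r => r != "-"))) := by
    refine (List.perm_ext_iff_of_nodup (PySem.Set.nodup_ofList _) (PySem.Set.nodup_ofList _)).mpr ?_
    intro a
    simp only [PySem.Set.mem_ofList, List.mem_filter, PySem.List.mem_sorted,
      List.mem_append, bne_iff_ne, ne_eq]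
  have hlt : ((PySem.Set.ofList
        ((PySem.List.sorted (core ++ var) (fun x => x)).filter (fun x => x != "-")))).Pairwise
      (fun a b => a < b) := by
    have hle : ((PySem.List.sorted (core ++ var) (fun x => x)).filter
        (fun x => x != "-")).Pairwise (fun a b => a ≤ b) :=
      (PySem.List.sorted_pairwise (core ++ var) (fun x => x)).filter _
    have hle2 := hle.sublist (ofList_sublist _)
    have hnd : ((PySem.Set.ofList
        ((PySem.List.sorted (core ++ var) (fun x => x)).filter (fun x => x != "-")))).Pairwise
        (fun a b => a ≠ b) := PySem.Set.nodup_ofList _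
    exact (hle2.and hnd).imp (fun h => lt_of_le_of_ne h.1 h.2)
  -- sorting B's items by key gives A's list
  have hsort : PySem.List.sorted d2.items (fun kv => kv.1)
      = (PySem.Set.ofList
          ((PySem.List.sorted (core ++ var) (fun x => x)).filter (fun x => x != "-"))).map
          (fun k => (k, pvValA tc core k)) := by
    apply PySem.List.sorted_eq_of_perm_of_pairwise_lt
    · rw [hitems]
      exact hperm.map _
    · exact List.pairwise_map.mpr (by simpa using hlt)
  show convert_pairwise_aln_to_json tc core var = PySem.List.sorted d2.items (fun kv => kv.1)
  rw [hA, hsort]
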